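-- pv_equiv track=rewrite | github.com/ZachGlassman/LabTools | labscript_desc.py | find_same_scans
-- ===== SOURCE A (Python) =====
-- def dict_equal(d1, d2):
--     #first check if keys are equal
--     if d1.keys() != d2.keys():
--         return False, False
--     else:
--         same_vals = True
--         for k,v in d1.items():
--             try:
--                 if v != d2[k]:
--                     same_vals = False
--             except ValueError:
--                 if v.all() != d2[k].all():
--                     same_vals = False
--         return True, same_vals
--
-- def find_same_scans(run_info):
--     #get list of tuples with same scan params
--     # dict isn't hashable so can't use set, will use stupid algorithm, but will be find for low numbers
--     a = {k:v for k,v in run_info.items() if len(v) > 1}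
--     keys = list(a.keys())
--     ans = []
--     for i in range(len(a)-1):
--         key = keys.pop(0)
--         for k,v in a.items():
--             same_keys, same_values = dict_equal(a[key], v)
--             if same_keys and k != key:
--                 ans.append([key,k, same_values])
--
--     _str = "Scans with same scanned parameters are :\n"
--     for i in ans:
--         _str += "{}, {} :\n Same vals : {}\n".format(i[0],i[1],i[2])
--
--     return _str
-- ===== SOURCE B (Python) =====
-- def find_same_scans(run_info):
--     # Group scans by their (sorted) set of scanned parameter names, so each scan is
--     # only compared with scans sharing the same key set; values are compared directly.
--     a = {k: v for k, v in run_info.items() if len(v) > 1}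
--     sigs = {k: tuple(sorted(v)) for k, v in a.items()}
--     groups = {}
--     pairs = [(sigs[k], (k, v)) for k, v in a.items()]
--     for s, kv in pairs:
--         groups.setdefault(s, []).append(kv)
--     out = "Scans with same scanned parameters are :\n"
--     items = list(a.items())
--     for k, v in items[:-1]:
--         for k2, v2 in groups[sigs[k]]:
--             if k2 != k:
--                 same_vals = all(x == v2[p] for p, x in v.items())
--                 out += "{}, {} :\n Same vals : {}\n".format(k, k2, same_vals)
--     return out
-- ===== Notes on version B (the rewrite author's own statement) =====
-- stated objective: faster
-- what changed: B precomputes each scan's sorted key-set signature once and groups scans by it in a dict, so each scan is compared only against its own signature group with a direct value comparison, instead of A's nested scan that re-runs dict_equal (key-set plus value comparison) for every ordered pair.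
import Mathlib
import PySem

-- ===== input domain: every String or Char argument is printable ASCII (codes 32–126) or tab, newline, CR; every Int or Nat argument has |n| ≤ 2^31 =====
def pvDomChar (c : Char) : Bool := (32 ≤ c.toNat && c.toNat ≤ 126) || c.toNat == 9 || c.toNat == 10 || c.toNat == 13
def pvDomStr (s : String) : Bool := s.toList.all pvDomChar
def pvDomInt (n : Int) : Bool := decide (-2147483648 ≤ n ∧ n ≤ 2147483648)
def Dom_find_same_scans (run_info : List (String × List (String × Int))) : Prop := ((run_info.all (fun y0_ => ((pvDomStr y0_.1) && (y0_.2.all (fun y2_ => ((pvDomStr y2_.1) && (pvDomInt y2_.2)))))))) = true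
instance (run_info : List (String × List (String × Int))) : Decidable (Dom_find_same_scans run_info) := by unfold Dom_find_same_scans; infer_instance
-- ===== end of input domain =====

-- B groups scans by their sorted key set so each scan is compared only with scans sharing the
-- same key set (objective: faster); return value only — neither program mutates its argument.

-- Shared helper: the argument is a Python dict of dicts — build it under Python dict semantics
-- (duplicate keys overwrite in place); used identically by both ports.
def pvScanDicts (run_info : List (String × List (String × Int))) :
    PySem.Dict String (PySem.Dict String Int) :=
  PySem.Dict.ofList (run_info.map (fun p => (p.1, PySem.Dict.ofList p.2)))

-- Shared helper: `a = {k: v for k, v in run_info.items() if len(v) > 1}` — a line both A and B contain verbatim.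
def pvBig (run_info : List (String × List (String × Int))) :
    PySem.Dict String (PySem.Dict String Int) :=
  (pvScanDicts run_info).items.foldl
    (fun d kv => if kv.2.size > 1 then d.insert kv.1 kv.2 else d) PySem.Dict.empty

-- Shared helper: the format string "{}, {} :\n Same vals : {}\n" (bools print as "True"/"False").
def pvFmt (key k : String) (sv : Bool) : String :=
  key ++ ", " ++ k ++ " :\n Same vals : " ++ (if sv then "True" else "False") ++ "\n"

-- ===== PORT A =====
-- dict_equal: key views compare as sets; values here are ints, so the ValueError branch is
-- unreachable, and `d2[k]` is only evaluated when the key sets are equal, so getD 0 is exact.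
def pvDictEqual (d1 d2 : PySem.Dict String Int) : Bool × Bool :=
  if !(PySem.Set.equal d1.keys d2.keys) then (false, false)
  else
    (true, d1.items.foldl (fun sv p => if p.2 != d2.getD p.1 0 then false else sv) true)

def find_same_scans (run_info : List (String × List (String × Int))) : String :=
  let a := pvBig run_info
  -- for i in range(len(a)-1): key = keys.pop(0); inner scan over a.items() appending to ans
  let st := List.foldl
    (fun (st : List String × List (String × String × Bool)) (_ : Int) =>
      let key := st.1.headD ""       -- keys.pop(0); the list is nonempty at every iteration
      let ans := List.foldl
        (fun ans kv =>
          let r := pvDictEqual (a.getD key PySem.Dict.empty) kv.2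
          if r.1 && (kv.1 != key) then ans ++ [(key, kv.1, r.2)] else ans)
        st.2 a.items
      (st.1.tail, ans))
    (a.keys, ([] : List (String × String × Bool)))
    (PySem.List.pyRange 0 ((a.size : Int) - 1) 1)
  List.foldl (fun s t => s ++ pvFmt t.1 t.2.1 t.2.2)
    "Scans with same scanned parameters are :\n" st.2

-- ===== PORT B =====
-- sig = tuple(sorted(v)) : the sorted list of parameter names
def pvSig (v : PySem.Dict String Int) : List String :=
  PySem.List.sorted v.keys (fun x => x)

def find_same_scans_alt (run_info : List (String × List (String × Int))) : String :=
  let a := pvBig run_info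
  let sigs := a.items.foldl (fun d kv => d.insert kv.1 (pvSig kv.2)) PySem.Dict.empty
  let pairs := a.items.map (fun kv => (sigs.getD kv.1 [], kv))
  -- groups.setdefault(s, []).append(kv)
  let groups := pairs.foldl (fun g p => g.modify p.1 [] (fun x => x ++ [p.2])) PySem.Dict.empty
  let items := PySem.List.slice a.items none (some (-1))   -- items[:-1]
  List.foldl
    (fun out kv =>
      List.foldl
        (fun out kv2 =>
          if kv2.1 != kv.1 then
            out ++ pvFmt kv.1 kv2.1 (kv.2.items.all (fun p => p.2 == kv2.2.getD p.1 0))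
          else out)
        out (groups.getD (sigs.getD kv.1 []) []))
    "Scans with same scanned parameters are :\n" items

-- ===== PRECONDITION & SPEC =====
def Spec_find_same_scans (run_info : List (String × List (String × Int))) (out : String) : Prop := out = find_same_scans_alt run_info
instance (run_info : List (String × List (String × Int))) (out : String) : Decidable (Spec_find_same_scans run_info out) := by unfold Spec_find_same_scans; infer_instance

-- ===== CLAIM (what is proved, stated in full; the proofs are below) =====
def Claim_equal_find_same_scans : Prop := ∀ (run_info : List (String × List (String × Int))), Dom_find_same_scans run_info → Spec_find_same_scans run_info (find_same_scans run_info)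

-- ===== LEMMAS AND PROOFS =====

-- keys stay Nodup through a conditional-insert loop
lemma pv_nodup_keys_iffold {κ ν : Type} [BEq κ] [LawfulBEq κ] (c : κ × ν → Prop) [DecidablePred c] :
    ∀ (l : List (κ × ν)) (d : PySem.Dict κ ν), d.keys.Nodup →
      (l.foldl (fun d kv => if c kv then d.insert kv.1 kv.2 else d) d).keys.Nodup := by
  intro l
  induction l with
  | nil => intro d h; simpa using h
  | cons x xs ih =>
    intro d h
    simp only [List.foldl_cons]
    by_cases hc : c x
    · simp only [if_pos hc]; exact ih _ (PySem.Dict.nodup_keys_insert _ _ _ h)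
    · simp only [if_neg hc]; exact ih _ h

-- a property of values is preserved through an insert loop (with or without a condition)
lemma pv_valprop_iffold {κ ν : Type} [BEq κ] [LawfulBEq κ] (Q : ν → Prop) (c : κ × ν → Prop) [DecidablePred c] :
    ∀ (l : List (κ × ν)) (d : PySem.Dict κ ν), (∀ kv ∈ l, Q kv.2) → (∀ kv ∈ d.items, Q kv.2) →
      ∀ kv ∈ (l.foldl (fun d kv => if c kv then d.insert kv.1 kv.2 else d) d).items, Q kv.2 := by
  intro l
  induction l with
  | nil => intro d _ hd; simpa using hd
  | cons x xs ih =>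
    intro d hl hd
    simp only [List.foldl_cons]
    by_cases hc : c x
    · simp only [if_pos hc]
      refine ih _ (fun kv hkv => hl kv (List.mem_cons_of_mem _ hkv)) ?_
      intro kv hkv
      rcases (PySem.Dict.mem_items_insert d x.1 x.2 kv).mp hkv with h | ⟨h, _⟩
      · subst h; exact hl x (List.mem_cons_self)
      · exact hd kv h
    · simp only [if_neg hc]
      exact ih _ (fun kv hkv => hl kv (List.mem_cons_of_mem _ hkv)) hd

lemma pv_valprop_update {κ ν : Type} [BEq κ] [LawfulBEq κ] (Q : ν → Prop) :
    ∀ (l : List (κ × ν)) (d : PySem.Dict κ ν), (∀ kv ∈ l, Q kv.2) → (∀ kv ∈ d.items, Q kv.2) →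
      ∀ kv ∈ (d.update l).items, Q kv.2 := by
  intro l
  induction l with
  | nil => intro d _ hd; simpa [PySem.Dict.update] using hd
  | cons x xs ih =>
    intro d hl hd
    simp only [PySem.Dict.update, List.foldl_cons] at *
    refine ih _ (fun kv hkv => hl kv (List.mem_cons_of_mem _ hkv)) ?_
    intro kv hkv
    rcases (PySem.Dict.mem_items_insert d x.1 x.2 kv).mp hkv with h | ⟨h, _⟩
    · subst h; exact hl x (List.mem_cons_self)
    · exact hd kv h

-- every value of pvBig run_info has Nodup keys (values come from PySem.Dict.ofList)
lemma pv_big_val_nodup (run_info : List (String × List (String × Int))) :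
    ∀ kv ∈ (pvBig run_info).items, kv.2.keys.Nodup := by
  have h0 : ∀ kv ∈ (PySem.Dict.empty : PySem.Dict String (PySem.Dict String Int)).items,
      kv.2.keys.Nodup := by
    intro kv hkv
    simp [PySem.Dict.empty] at hkv
  have h1 : ∀ kv ∈ (pvScanDicts run_info).items, kv.2.keys.Nodup := by
    unfold pvScanDicts PySem.Dict.ofList
    refine pv_valprop_update (fun v => PySem.Dict.keys v |>.Nodup) _ _ ?_ h0
    intro kv hkv
    rcases List.mem_map.mp hkv with ⟨p, _, rfl⟩
    exact PySem.Dict.nodup_keys_ofList _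
  unfold pvBig
  exact pv_valprop_iffold (fun v => PySem.Dict.keys v |>.Nodup) _ _ _ h1 h0

lemma pv_big_keys_nodup (run_info : List (String × List (String × Int))) :
    (pvBig run_info).keys.Nodup := by
  unfold pvBig
  exact pv_nodup_keys_iffold _ _ _ PySem.Dict.nodup_keys_empty

-- A's same_vals flag loop is List.all
lemma pv_flagfold {α : Type} (q : α → Bool) :
    ∀ (xs : List α) (b : Bool),
      xs.foldl (fun sv p => if q p then false else sv) b = (b && xs.all (fun p => !q p)) := by
  intro xs
  induction xs with
  | nil => intro b; simp
  | cons x xs ih =>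
    intro b
    cases hq : q x
    · have h : (if q x = true then false else b) = b := by simp [hq]
      rw [List.foldl_cons, h, ih]; simp [hq]
    · have h : (if q x = true then false else b) = false := by simp [hq]
      rw [List.foldl_cons, h, ih]; simp [hq]

lemma pv_dictEqual_fst (d1 d2 : PySem.Dict String Int) :
    (pvDictEqual d1 d2).1 = PySem.Set.equal d1.keys d2.keys := by
  unfold pvDictEqual
  by_cases h : PySem.Set.equal d1.keys d2.keys <;> simp [h]

lemma pv_dictEqual_snd (d1 d2 : PySem.Dict String Int)
    (h : PySem.Set.equal d1.keys d2.keys = true) :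
    (pvDictEqual d1 d2).2 = d1.items.all (fun p => p.2 == d2.getD p.1 0) := by
  unfold pvDictEqual
  rw [pv_flagfold (fun p => p.2 != d2.getD p.1 0) d1.items true]
  simp [h, bne]

-- sorted key lists are equal iff the key sets are equal (both key lists Nodup)
lemma pv_sig_eq_iff (l1 l2 : List String) (h1 : l1.Nodup) (h2 : l2.Nodup) :
    ((PySem.List.sorted l1 (fun x => x)) = PySem.List.sorted l2 (fun x => x)) ↔
      PySem.Set.equal l1 l2 = true := by
  rw [PySem.List.sorted_id_eq_sorted_id_iff_perm, PySem.Set.equal_iff,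
    List.perm_ext_iff_of_nodup h1 h2]

-- A's outer loop: pop-the-head state loop over a range that ignores its loop variable
lemma pv_poploop {γ α β : Type} (G : α → List β) (dflt : α) :
    ∀ (l : List γ) (ks : List α) (ans : List β), l.length ≤ ks.length →
      (l.foldl (fun (st : List α × List β) _ => (st.1.tail, st.2 ++ G (st.1.headD dflt)))
        (ks, ans)).2 = ans ++ (ks.take l.length).flatMap G := by
  intro l
  induction l with
  | nil => intro ks ans _; simp
  | cons c l ih =>
    intro ks ans h
    cases ks with
    | nil => simp at h
    | cons k ks' =>
      simp only [List.foldl_cons, List.headD_cons, List.tail_cons, List.length_cons,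
        List.take_succ_cons, List.flatMap_cons]
      rw [ih ks' (ans ++ G k) (by simpa using h)]
      simp

-- the canonical pair list both programs produce
def pvTriples (a : PySem.Dict String (PySem.Dict String Int)) : List (String × String × Bool) :=
  (a.items.take (a.items.length - 1)).flatMap
    (fun kv =>
      (a.items.filter
          (fun kv2 => PySem.Set.equal kv.2.keys kv2.2.keys && (kv2.1 != kv.1))).map
        (fun kv2 => (kv.1, kv2.1, kv.2.items.all (fun p => p.2 == kv2.2.getD p.1 0))))

def pvRender (ts : List (String × String × Bool)) : String :=
  ts.foldl (fun s t => s ++ pvFmt t.1 t.2.1 t.2.2) "Scans with same scanned parameters are :\n"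

-- ===== A reduces to pvRender/pvTriples =====
lemma pv_A_eq (run_info : List (String × List (String × Int))) :
    find_same_scans run_info = pvRender (pvTriples (pvBig run_info)) := by
  unfold find_same_scans pvRender
  set a := pvBig run_info with ha
  have hknd : a.keys.Nodup := pv_big_keys_nodup run_info
  have hvnd : ∀ kv ∈ a.items, kv.2.keys.Nodup := pv_big_val_nodup run_info
  -- inner append-if loop → filter/map
  simp only [PySem.List.foldl_append_if]
  -- outer pop loop
  rw [pv_poploop
      (fun key => (a.items.filter
          (fun kv => (pvDictEqual (a.getD key PySem.Dict.empty) kv.2).1 && (kv.1 != key))).map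
        (fun kv => (key, kv.1, (pvDictEqual (a.getD key PySem.Dict.empty) kv.2).2))) ""
      _ _ _ (by
        simp [PySem.List.length_pyRange_one, PySem.Dict.size, PySem.Dict.keys])]
  have hlen : ((PySem.List.pyRange 0 ((a.size : Int) - 1) 1).length) = a.items.length - 1 := by
    simp [PySem.List.length_pyRange_one, PySem.Dict.size]
  rw [hlen]
  -- keys.take = (items.take).map fst, then flatMap over the map
  have hkeys : a.keys.take (a.items.length - 1) =
      (a.items.take (a.items.length - 1)).map (fun x => x.1) := by
    simp [PySem.Dict.keys, List.map_take]
  rw [hkeys, List.flatMap_map]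
  -- pointwise conversion to pvTriples
  unfold pvTriples
  congr 1
  apply List.flatMap_congr
  intro kv hkv
  have hkv' : kv ∈ a.items := List.mem_of_mem_take hkv
  have hget : a.getD kv.1 PySem.Dict.empty = kv.2 :=
    PySem.Dict.getD_of_mem_items a (by simpa using hkv') hknd _
  rw [hget]
  have hfil : a.items.filter (fun kv2 => (pvDictEqual kv.2 kv2.2).1 && (kv2.1 != kv.1)) =
      a.items.filter (fun kv2 => PySem.Set.equal kv.2.keys kv2.2.keys && (kv2.1 != kv.1)) := by
    apply List.filter_congr
    intro kv2 _
    rw [pv_dictEqual_fst]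
  rw [hfil]
  apply List.map_congr_left
  intro kv2 hkv2
  have hm := List.mem_filter.mp hkv2
  have heq : PySem.Set.equal kv.2.keys kv2.2.keys = true := by
    have := hm.2; simp only [Bool.and_eq_true] at this; exact this.1
  rw [pv_dictEqual_snd _ _ heq]

-- ===== B reduces to pvRender/pvTriples =====
lemma pv_B_eq (run_info : List (String × List (String × Int))) :
    find_same_scans_alt run_info = pvRender (pvTriples (pvBig run_info)) := by
  unfold find_same_scans_alt pvRender
  simp only [PySem.List.slice_to_neg_one, List.dropLast_eq_take]
  set a := pvBig run_info with ha
  have hknd : a.keys.Nodup := pv_big_keys_nodup run_info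
  have hvnd : ∀ kv ∈ a.items, kv.2.keys.Nodup := pv_big_val_nodup run_info
  set sigs := a.items.foldl (fun d kv => d.insert kv.1 (pvSig kv.2)) PySem.Dict.empty with hsigs
  -- sigs lookup of any entry of a
  have hsig : ∀ kv ∈ a.items, sigs.getD kv.1 [] = pvSig kv.2 := by
    intro kv hkv
    have hitems : sigs.items = a.items.map (fun kv => (kv.1, pvSig kv.2)) := by
      rw [hsigs]
      have := PySem.Dict.items_foldl_insert_fresh a.items (fun kv => kv.1)
        (fun kv => pvSig kv.2) PySem.Dict.empty (by intro p _; exact PySem.Dict.contains_empty _)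
        (by simpa [PySem.Dict.keys] using hknd)
      simpa [PySem.Dict.empty] using this
    have hnd : sigs.keys.Nodup := by
      rw [hsigs]
      exact PySem.Dict.nodup_keys_foldl_insert_key a.items (fun kv => kv.1)
        (fun _ kv => pvSig kv.2) PySem.Dict.empty PySem.Dict.nodup_keys_empty
    exact PySem.Dict.getD_of_mem_items sigs
      (by rw [hitems]; exact List.mem_map.mpr ⟨kv, hkv, rfl⟩) hnd _
  -- groups lookup is a filter of a.items
  have hgrp : ∀ s, ((a.items.map (fun kv => (sigs.getD kv.1 [], kv))).foldl
        (fun g p => g.modify p.1 [] (fun x => x ++ [p.2])) PySem.Dict.empty).getD s [] =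
      a.items.filter (fun kv => sigs.getD kv.1 [] == s) := by
    intro s
    rw [PySem.Dict.getD_foldl_modify_append]
    simp [List.filter_map, Function.comp_def, List.map_map]
  simp only [hgrp]
  -- inner loop: foldl over filter of filter → foldl over the mapped triple list
  have hcongr : ∀ (out : String), ∀ kv ∈ a.items.take (a.items.length - 1),
      List.foldl
        (fun out kv2 =>
          if kv2.1 != kv.1 then
            out ++ pvFmt kv.1 kv2.1 (kv.2.items.all (fun p => p.2 == kv2.2.getD p.1 0))
          else out)
        out (a.items.filter (fun kv2 => sigs.getD kv2.1 [] == sigs.getD kv.1 [])) =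
      List.foldl (fun s t => s ++ pvFmt t.1 t.2.1 t.2.2) out
        ((a.items.filter
            (fun kv2 => PySem.Set.equal kv.2.keys kv2.2.keys && (kv2.1 != kv.1))).map
          (fun kv2 => (kv.1, kv2.1, kv.2.items.all (fun p => p.2 == kv2.2.getD p.1 0)))) := by
    intro out kv hkv
    have hkv' : kv ∈ a.items := List.mem_of_mem_take hkv
    rw [List.foldl_map, ← List.foldl_filter, List.filter_filter]
    congr 1
    apply List.filter_congr
    intro kv2 hkv2
    rw [hsig kv hkv', hsig kv2 hkv2]
    have hiff : (pvSig kv2.2 == pvSig kv.2) = PySem.Set.equal kv.2.keys kv2.2.keys := by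
      rw [Bool.eq_iff_iff, beq_iff_eq]
      unfold pvSig
      rw [pv_sig_eq_iff _ _ (hvnd kv2 hkv2) (hvnd kv hkv'), PySem.Set.equal_iff,
        PySem.Set.equal_iff]
      constructor <;> intro h x <;> exact (h x).symm
    rw [hiff, Bool.and_comm]
  -- outer loop → fold over the flatMap
  unfold pvTriples
  rw [List.foldl_flatMap]
  apply PySem.List.foldl_congr_mem'
  intro kv hkv out
  exact hcongr out kv hkv

-- ===== VERDICT (by name: the statement is the Claim_ definition above) =====
theorem find_same_scans_spec : Claim_equal_find_same_scans := by
  intro run_info _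
  unfold Spec_find_same_scans
  rw [pv_A_eq, pv_B_eq]
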